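-- pv_equiv track=rewrite | github.com/8090-inc/medicaid-claims-data-public | scripts/validation/accuracy_metrics.py | compute_overlap_matrix
-- ===== SOURCE A (Python) =====
-- def compute_overlap_matrix(findings_by_method):
--     """Compute pairwise overlap between detection methods.
--
--     Args:
--         findings_by_method: dict mapping method_name -> list of findings.
--
--     Returns:
--         dict of (method_a, method_b) -> overlap_count.
--     """
--     method_npis = {}
--     for method, findings in findings_by_method.items():
--         npis = set()
--         for f in findings:
--             npis.update(f.get('flagged_providers', []))
--         method_npis[method] = npis
--
--     overlaps = {}
--     methods = sorted(method_npis.keys())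
--     for i, m1 in enumerate(methods):
--         for m2 in methods[i + 1:]:
--             overlap = method_npis[m1] & method_npis[m2]
--             overlaps[(m1, m2)] = len(overlap)
--
--     return overlaps
-- ===== SOURCE B (Python) =====
-- def compute_overlap_matrix(findings_by_method):
--     """Compute pairwise overlap between detection methods.
--
--     Inverted-index formulation: map each flagged provider to the (deduplicated)
--     list of methods that flagged it, then count each provider once for every
--     sorted pair of its methods, over zero-initialised sorted method pairs.
--     """
--     index = {}
--     for method, findings in findings_by_method.items():
--         for f in findings:
--             for npi in f.get('flagged_providers', []):
--                 ms = index.setdefault(npi, [])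
--                 if method not in ms:
--                     ms.append(method)
--
--     def pairs(ms):
--         if not ms:
--             return []
--         return [(ms[0], m2) for m2 in ms[1:]] + pairs(ms[1:])
--
--     overlaps = {}
--     for p in pairs(sorted(findings_by_method)):
--         overlaps[p] = 0
--     for ms in index.values():
--         for p in pairs(sorted(ms)):
--             overlaps[p] += 1
--     return overlaps
-- ===== Notes on version B (the rewrite author's own statement) =====
-- stated objective: alternative
-- what changed: Replaces the per-pair set intersections (method->provider sets, intersected for every sorted pair) by an inverted index provider->methods plus a recursive pair generator: every zero-initialised sorted method pair is incremented once per shared provider, so no set intersection is ever computed.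
import Mathlib
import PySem

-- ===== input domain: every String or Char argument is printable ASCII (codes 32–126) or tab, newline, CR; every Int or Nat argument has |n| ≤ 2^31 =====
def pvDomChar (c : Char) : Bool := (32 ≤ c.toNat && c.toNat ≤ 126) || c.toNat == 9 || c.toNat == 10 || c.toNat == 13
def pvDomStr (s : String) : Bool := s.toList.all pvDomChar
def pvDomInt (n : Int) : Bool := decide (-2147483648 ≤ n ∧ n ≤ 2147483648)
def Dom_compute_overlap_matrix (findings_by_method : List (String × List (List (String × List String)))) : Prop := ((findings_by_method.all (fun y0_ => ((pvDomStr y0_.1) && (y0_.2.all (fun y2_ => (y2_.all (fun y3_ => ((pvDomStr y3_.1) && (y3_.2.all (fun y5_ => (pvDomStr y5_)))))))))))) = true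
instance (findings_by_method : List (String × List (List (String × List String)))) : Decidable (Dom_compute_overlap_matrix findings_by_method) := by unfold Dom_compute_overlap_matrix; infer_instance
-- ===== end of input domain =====

-- B replaces A's per-pair set intersections by an inverted index provider -> methods with a
-- recursive pair generator, incrementing each zero-initialised sorted method pair once per
-- shared provider (objective: alternative).


-- ===== PORT A =====
-- Literal port of A: build method -> set of flagged providers, then for every sorted pair
-- (m1, m2), i < j, store the size of the set intersection.  `method_npis[m1]` is ported as
-- `getD … PySem.Set.empty`; exact here because m1/m2 are always keys of method_npis.
def compute_overlap_matrix (findings_by_method : List (String × List (List (String × List String)))) : List (String × String × Int) :=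
  let method_npis : PySem.Dict String (PySem.Set String) :=
    findings_by_method.foldl (fun d mf =>
      let npis : PySem.Set String :=
        mf.2.foldl (fun s f => PySem.Set.update s (PySem.Dict.getD (PySem.Dict.mk f) "flagged_providers" [])) PySem.Set.empty
      d.insert mf.1 npis) PySem.Dict.empty
  let methods := PySem.List.sorted method_npis.keys (fun x => x)
  let overlaps : PySem.Dict (String × String) Int :=
    (PySem.List.enumerate methods).foldl (fun ov p =>
      (PySem.List.slice methods (some (p.1 + 1)) none).foldl (fun ov m2 =>
        ov.insert (p.2, m2)
          (PySem.Set.len (PySem.Set.inter (method_npis.getD p.2 PySem.Set.empty) (method_npis.getD m2 PySem.Set.empty)))) ov)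
      PySem.Dict.empty
  overlaps.items.map (fun q => (q.1.1, q.1.2, q.2))

-- ===== PORT B =====
-- Source B's recursive helper `pairs`: all (ms[i], ms[j]) with i < j, front first.
def pvPairsB : List String → List (String × String)
  | [] => []
  | m :: rest => rest.map (fun m2 => (m, m2)) ++ pvPairsB rest

-- Port of B (Source B): inverted index npi -> dedup list of methods (setdefault + in-place append
-- = overwrite-in-place insert), zero-init all sorted pairs produced by the recursive `pairs`,
-- then one increment per (provider, pair); `overlaps[p] += 1` is ported as `modify p 0 (· + 1)`,
-- exact because the incremented key is always present.
def compute_overlap_matrix_alt (findings_by_method : List (String × List (List (String × List String)))) : List (String × String × Int) :=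
  let index : PySem.Dict String (List String) :=
    findings_by_method.foldl (fun d mf =>
      mf.2.foldl (fun d f =>
        (PySem.Dict.getD (PySem.Dict.mk f) "flagged_providers" []).foldl (fun d npi =>
          let ms := d.getD npi []
          if mf.1 ∈ ms then d else d.insert npi (ms ++ [mf.1])) d) d) PySem.Dict.empty
  let overlaps0 : PySem.Dict (String × String) Int :=
    (pvPairsB (PySem.List.sorted (findings_by_method.map Prod.fst) (fun x => x))).foldl
      (fun ov p => ov.insert p 0) PySem.Dict.empty
  let overlaps : PySem.Dict (String × String) Int :=
    index.values.foldl (fun ov ms =>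
      (pvPairsB (PySem.List.sorted ms (fun x => x))).foldl
        (fun ov p => ov.modify p 0 (· + 1)) ov) overlaps0
  overlaps.items.map (fun q => (q.1.1, q.1.2, q.2))

-- ===== PRECONDITION & SPEC =====
-- Pre_ excludes association lists with duplicate method keys: those do not encode any Python
-- dict (A's argument is a dict, whose keys are necessarily distinct).
def Pre_compute_overlap_matrix (findings_by_method : List (String × List (List (String × List String)))) : Prop :=
  (findings_by_method.map Prod.fst).Nodup
instance (findings_by_method : List (String × List (List (String × List String)))) : Decidable (Pre_compute_overlap_matrix findings_by_method) := by unfold Pre_compute_overlap_matrix; infer_instance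
def pvWitness_compute_overlap_matrix : (List (String × List (List (String × List String)))) :=
  [("a", [[("flagged_providers", ["x", "y"])]]), ("b", [[("flagged_providers", ["y"])], [("note", ["z"])]])]
def Spec_compute_overlap_matrix (findings_by_method : List (String × List (List (String × List String)))) (out : List (String × String × Int)) : Prop := out = compute_overlap_matrix_alt findings_by_method
instance (findings_by_method : List (String × List (List (String × List String)))) (out : List (String × String × Int)) : Decidable (Spec_compute_overlap_matrix findings_by_method out) := by unfold Spec_compute_overlap_matrix; infer_instance

-- ===== CLAIM (what is proved, stated in full; the proofs are below) =====
def Claim_equal_compute_overlap_matrix : Prop := ∀ (findings_by_method : List (String × List (List (String × List String)))), Dom_compute_overlap_matrix findings_by_method → Pre_compute_overlap_matrix findings_by_method → Spec_compute_overlap_matrix findings_by_method (compute_overlap_matrix findings_by_method)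

-- ===== LEMMAS AND PROOFS =====

-- proof-side abbreviations
def pvGetF (f : List (String × List String)) : List String :=
  PySem.Dict.getD (PySem.Dict.mk f) "flagged_providers" []

def pvFlat (mf : String × List (List (String × List String))) : List String :=
  mf.2.flatMap pvGetF

def pvNpis (mf : String × List (List (String × List String))) : PySem.Set String :=
  mf.2.foldl (fun s f => PySem.Set.update s (pvGetF f)) PySem.Set.empty

def pvTrips (fbm : List (String × List (List (String × List String)))) : List (String × String) :=
  fbm.flatMap (fun mf => (pvFlat mf).map (fun n => (n, mf.1)))

def pvStep (d : PySem.Dict String (List String)) (t : String × String) : PySem.Dict String (List String) :=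
  let ms := d.getD t.1 []
  if t.2 ∈ ms then d else d.insert t.1 (ms ++ [t.2])

def pvMnp (fbm : List (String × List (List (String × List String)))) : PySem.Dict String (PySem.Set String) :=
  fbm.foldl (fun d mf => d.insert mf.1 (pvNpis mf)) PySem.Dict.empty

def pvMethods (fbm : List (String × List (List (String × List String)))) : List String :=
  PySem.List.sorted (fbm.map Prod.fst) (fun x => x)

def pvCA (fbm : List (String × List (List (String × List String)))) (q : String × String) : Int :=
  PySem.Set.len (PySem.Set.inter ((pvMnp fbm).getD q.1 PySem.Set.empty) ((pvMnp fbm).getD q.2 PySem.Set.empty))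

def pvIdx (fbm : List (String × List (List (String × List String)))) : PySem.Dict String (List String) :=
  (pvTrips fbm).foldl pvStep PySem.Dict.empty

def pvDB0 (fbm : List (String × List (List (String × List String)))) : PySem.Dict (String × String) Int :=
  (pvPairsB (pvMethods fbm)).foldl (fun ov p => ov.insert p 0) PySem.Dict.empty

-- the nested "for i, m1 in enumerate(ms): for m2 in ms[i+1:]" loop of A is a fold over pvPairsB ms
theorem pv_enum_slice_foldl {σ : Type} (g : σ → String → String → σ) :
    ∀ (pre ms : List String) (init : σ),
      (PySem.List.enumerate ms (pre.length : Int)).foldl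
        (fun acc p => (PySem.List.slice (pre ++ ms) (some (p.1 + 1)) none).foldl
          (fun acc y => g acc p.2 y) acc) init
      = (pvPairsB ms).foldl (fun acc q => g acc q.1 q.2) init := by
  intro pre ms
  induction ms generalizing pre with
  | nil => intro init; simp [PySem.List.enumerate, pvPairsB]
  | cons x t ih =>
    intro init
    have hstep : PySem.List.enumerate (x :: t) (pre.length : Int)
        = ((pre.length : Int), x) :: PySem.List.enumerate t ((pre.length : Int) + 1) := rfl
    have hsl : PySem.List.slice (pre ++ x :: t) (some ((pre.length : Int) + 1)) none
        = t := by
      rw [PySem.List.slice_from (pre ++ x :: t) (by positivity)]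
      have : ((pre.length : Int) + 1).toNat = pre.length + 1 := by omega
      rw [this]
      rw [show pre.length + 1 = (pre ++ [x]).length by simp]
      rw [show pre ++ x :: t = (pre ++ [x]) ++ t by simp]
      simp
    have henum : ((pre.length : Int) + 1) = ((pre ++ [x]).length : Int) := by simp
    rw [hstep, List.foldl_cons, hsl]
    have ih' := ih (pre := pre ++ [x])
    rw [henum]
    rw [show pre ++ x :: t = (pre ++ [x]) ++ t by simp]
    rw [ih' (List.foldl (fun acc y => g acc x y) init t)]
    simp [pvPairsB, List.foldl_append, List.foldl_map]

theorem pv_mem_of_mem_pvPairsB {l : List String} {q : String × String} (h : q ∈ pvPairsB l) :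
    q.1 ∈ l ∧ q.2 ∈ l := by
  induction l with
  | nil => simp [pvPairsB] at h
  | cons x t ih =>
    simp only [pvPairsB, List.mem_append, List.mem_map] at h
    rcases h with ⟨y, hy, hq⟩ | h
    · subst hq; exact ⟨by simp, by simp [hy]⟩
    · rcases ih h with ⟨h1, h2⟩; exact ⟨by simp [h1], by simp [h2]⟩

theorem pv_mem_pvPairsB_iff {l : List String}
    (hl : l.Pairwise (· < ·)) (a b : String) :
    (a, b) ∈ pvPairsB l ↔ a ∈ l ∧ b ∈ l ∧ a < b := by
  induction l with
  | nil => simp [pvPairsB]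
  | cons x t ih =>
    have hx : ∀ y ∈ t, x < y := fun y hy => (List.pairwise_cons.1 hl).1 y hy
    have ht : t.Pairwise (· < ·) := (List.pairwise_cons.1 hl).2
    simp only [pvPairsB, List.mem_append, List.mem_map, List.mem_cons]
    constructor
    · rintro (⟨y, hy, hq⟩ | h)
      · injection hq with h1 h2; subst h1; subst h2
        exact ⟨Or.inl rfl, Or.inr hy, hx _ hy⟩
      · rcases (ih ht).1 h with ⟨ha, hb, hab⟩
        exact ⟨Or.inr ha, Or.inr hb, hab⟩
    · rintro ⟨ha | ha, hb | hb, hab⟩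
      · exact absurd (ha ▸ hb ▸ hab) (lt_irrefl _)
      · exact Or.inl ⟨b, hb, by rw [ha]⟩
      · exact absurd (hb ▸ (hx a ha)) (fun h' => lt_asymm hab h')
      · exact Or.inr ((ih ht).2 ⟨ha, hb, hab⟩)

theorem pv_pvPairsB_nodup {l : List String}
    (hl : l.Pairwise (· < ·)) : (pvPairsB l).Nodup := by
  induction l with
  | nil => simp [pvPairsB]
  | cons x t ih =>
    have hx : ∀ y ∈ t, x < y := fun y hy => (List.pairwise_cons.1 hl).1 y hy
    have ht : t.Pairwise (· < ·) := (List.pairwise_cons.1 hl).2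
    have hnd : t.Nodup := ht.imp (fun h => ne_of_lt h)
    refine List.Nodup.append ((hnd.map ?_)) (ih ht) ?_
    · intro a b hab; simpa using hab
    · intro q hq1 hq2
      rcases List.mem_map.1 hq1 with ⟨y, _, hq⟩
      have h1 : q.1 = x := by rw [← hq]
      have := (pv_mem_of_mem_pvPairsB hq2).1
      rw [h1] at this
      exact absurd (hx x this) (lt_irrefl x)

theorem pv_sorted_lt {l : List String} (h : l.Nodup) :
    (PySem.List.sorted l (fun x => x)).Pairwise (· < ·) := by
  have hle := PySem.List.sorted_pairwise l (fun x => x)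
  have hnd : (PySem.List.sorted l (fun x => x) false).Nodup :=
    (PySem.List.sorted_perm l (fun x => x) false).nodup_iff.2 h
  exact List.Pairwise.imp₂ (fun a b hab hne => lt_of_le_of_ne hab hne) hle hnd

theorem pv_count_pvPairsB_sorted {m1 m2 : String} (hlt : m1 < m2) (s : List String)
    (hnd : s.Nodup) :
    List.count (m1, m2) (pvPairsB (PySem.List.sorted s (fun x => x)))
      = if m1 ∈ s ∧ m2 ∈ s then 1 else 0 := by
  have hp := pv_sorted_lt (l := s) hnd
  have hmem : (m1, m2) ∈ pvPairsB (PySem.List.sorted s (fun x => x)) ↔ m1 ∈ s ∧ m2 ∈ s := by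
    rw [pv_mem_pvPairsB_iff hp]
    simp [PySem.List.mem_sorted, hlt]
  by_cases h : m1 ∈ s ∧ m2 ∈ s
  · rw [if_pos h]
    exact List.count_eq_one_of_mem (pv_pvPairsB_nodup hp) (hmem.2 h)
  · rw [if_neg h]
    exact List.count_eq_zero.2 (fun hc => h (hmem.1 hc))

-- A's inner set-building fold: membership and nodup
theorem pv_foldl_update_mem (l : List (List (String × List String))) :
    ∀ (s : PySem.Set String) (x : String),
      (x ∈ l.foldl (fun s f => PySem.Set.update s (pvGetF f)) s) ↔ x ∈ s ∨ ∃ f ∈ l, x ∈ pvGetF f := by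
  induction l with
  | nil => intro s x; simp
  | cons f t ih =>
    intro s x
    rw [List.foldl_cons, ih]
    simp [PySem.Set.mem_update]
    tauto

theorem pv_foldl_update_nodup (l : List (List (String × List String))) :
    ∀ (s : PySem.Set String), s.Nodup →
      (l.foldl (fun s f => PySem.Set.update s (pvGetF f)) s).Nodup := by
  induction l with
  | nil => intro s h; exact h
  | cons f t ih =>
    intro s h
    exact ih _ (PySem.Set.nodup_update _ _ h)

theorem pv_mem_npis (mf : String × List (List (String × List String))) (x : String) :
    x ∈ pvNpis mf ↔ x ∈ pvFlat mf := by
  unfold pvNpis pvFlat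
  rw [pv_foldl_update_mem]
  simp [PySem.Set.empty, List.mem_flatMap]

theorem pv_nodup_npis (mf : String × List (List (String × List String))) : (pvNpis mf).Nodup := by
  exact pv_foldl_update_nodup _ _ (by simp [PySem.Set.empty])

-- B's inverted-index fold, flattened to the triples list
theorem pv_index_eq_trips (fbm : List (String × List (List (String × List String)))) :
    fbm.foldl (fun d mf =>
      mf.2.foldl (fun d f =>
        (PySem.Dict.getD (PySem.Dict.mk f) "flagged_providers" []).foldl (fun d npi =>
          let ms := d.getD npi []
          if mf.1 ∈ ms then d else d.insert npi (ms ++ [mf.1])) d) d) PySem.Dict.empty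
    = (pvTrips fbm).foldl pvStep PySem.Dict.empty := by
  rw [pvTrips, List.foldl_flatMap]
  congr 1
  funext d mf
  rw [List.foldl_map]
  show _ = (mf.2.flatMap pvGetF).foldl (fun d n => pvStep d (n, mf.1)) d
  rw [List.foldl_flatMap]
  rfl

-- invariant of the triple fold
theorem pv_idx_spec (l : List (String × String)) :
    ∀ (d : PySem.Dict String (List String)), d.keys.Nodup →
      (∀ n, (d.getD n []).Nodup) →
      ((l.foldl pvStep d).keys.Nodup
       ∧ (∀ n, n ∈ (l.foldl pvStep d).keys ↔ n ∈ d.keys ∨ n ∈ l.map Prod.fst)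
       ∧ (∀ n m, m ∈ (l.foldl pvStep d).getD n [] ↔ m ∈ d.getD n [] ∨ (n, m) ∈ l)
       ∧ (∀ n, ((l.foldl pvStep d).getD n []).Nodup)) := by
  induction l with
  | nil => intro d hk hv; exact ⟨hk, by simp, by simp, hv⟩
  | cons t rest ih =>
    intro d hk hv
    rw [List.foldl_cons]
    by_cases h : t.2 ∈ d.getD t.1 []
    · have hstep : pvStep d t = d := by simp [pvStep, h]
      have hmemk : t.1 ∈ d.keys := by
        by_contra hc
        have hcf : d.contains t.1 = false := by
          cases hcb : d.contains t.1
          · rfl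
          · exact absurd ((PySem.Dict.contains_iff_mem_keys d t.1).1 hcb) hc
        rw [PySem.Dict.getD_of_not_contains d [] hcf] at h
        simp at h
      rw [hstep]
      obtain ⟨k1, k2, k3, k4⟩ := ih d hk hv
      refine ⟨k1, fun n => ?_, fun n m => ?_, k4⟩
      · rw [k2]
        simp only [List.map_cons, List.mem_cons]
        constructor
        · rintro (hn | hn)
          · exact Or.inl hn
          · exact Or.inr (Or.inr hn)
        · rintro (hn | hn | hn)
          · exact Or.inl hn
          · exact Or.inl (hn ▸ hmemk)
          · exact Or.inr hn
      · rw [k3]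
        simp only [List.mem_cons]
        constructor
        · rintro (hm | hm)
          · exact Or.inl hm
          · exact Or.inr (Or.inr hm)
        · rintro (hm | hm | hm)
          · exact Or.inl hm
          · have h1 : n = t.1 := by rw [← hm]
            have h2 : m = t.2 := by rw [← hm]
            subst h1; subst h2; exact Or.inl h
          · exact Or.inr hm
    · have hstep : pvStep d t = d.insert t.1 (d.getD t.1 [] ++ [t.2]) := by simp [pvStep, h]
      rw [hstep]
      have hk' : (d.insert t.1 (d.getD t.1 [] ++ [t.2])).keys.Nodup :=
        PySem.Dict.nodup_keys_insert d _ _ hk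
      have hv' : ∀ n, ((d.insert t.1 (d.getD t.1 [] ++ [t.2])).getD n []).Nodup := by
        intro n
        rw [PySem.Dict.getD_insert]
        split_ifs with hn
        · simp only [List.nodup_append]
          exact ⟨hv t.1, by simp, by intro a ha b hb hab; simp at hb; exact h ((hab.trans hb) ▸ ha)⟩
        · exact hv n
      obtain ⟨k1, k2, k3, k4⟩ := ih _ hk' hv'
      refine ⟨k1, fun n => ?_, fun n m => ?_, k4⟩
      · rw [k2]
        rw [PySem.Dict.mem_keys_insert]
        simp only [List.map_cons, List.mem_cons]
        tauto
      · rw [k3]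
        rw [PySem.Dict.getD_insert]
        simp only [List.mem_cons]
        constructor
        · rintro (hm | hm)
          · split_ifs at hm with hn
            · subst hn
              rcases List.mem_append.1 hm with hm' | hm'
              · exact Or.inl hm'
              · simp at hm'
                subst hm'
                exact Or.inr (Or.inl (by simp))
            · exact Or.inl hm
          · exact Or.inr (Or.inr hm)
        · rintro (hm | hm | hm)
          · split_ifs with hn
            · subst hn; exact Or.inl (List.mem_append.2 (Or.inl hm))
            · exact Or.inl hm
          · have h1 : n = t.1 := by rw [← hm]
            have h2 : m = t.2 := by rw [← hm]
            subst h1; subst h2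
            simp
          · exact Or.inr hm

-- zero-initialisation: every lookup in the pair-initialised dict is 0
theorem pv_getD_insert_zero (l : List (String × String)) :
    ∀ (d : PySem.Dict (String × String) Int) (p : String × String), d.getD p 0 = 0 →
      (l.foldl (fun ov q => ov.insert q (0 : Int)) d).getD p 0 = 0 := by
  induction l with
  | nil => intro d p h; exact h
  | cons q t ih =>
    intro d p h
    refine ih _ _ ?_
    rw [PySem.Dict.getD_insert]
    split_ifs <;> simp [h]

-- a modify at a present key leaves .keys unchanged
theorem pv_keys_modify_mem (d : PySem.Dict (String × String) Int) (p : String × String)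
    (h : p ∈ d.keys) : (d.modify p 0 (· + 1)).keys = d.keys := by
  rw [PySem.Dict.keys_modify]
  exact PySem.Dict.keys_insert_of_contains d _ ((PySem.Dict.contains_iff_mem_keys d p).2 h)

theorem pv_modlist_keys (l : List (String × String)) :
    ∀ (d : PySem.Dict (String × String) Int), (∀ q ∈ l, q ∈ d.keys) →
      (l.foldl (fun ov q => ov.modify q 0 (· + 1)) d).keys = d.keys := by
  induction l with
  | nil => intro d _; rfl
  | cons q t ih =>
    intro d h
    rw [List.foldl_cons, ih _ (fun r hr => ?_), pv_keys_modify_mem d q (h q (by simp))]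
    rw [pv_keys_modify_mem d q (h q (by simp))]
    exact h r (by simp [hr])

theorem pv_modfold_keys (vals : List (List String)) :
    ∀ (d : PySem.Dict (String × String) Int),
      (∀ ms ∈ vals, ∀ q ∈ pvPairsB (PySem.List.sorted ms (fun x => x)), q ∈ d.keys) →
      (vals.foldl (fun ov ms =>
        (pvPairsB (PySem.List.sorted ms (fun x => x))).foldl
          (fun ov p => ov.modify p 0 (· + 1)) ov) d).keys = d.keys := by
  induction vals with
  | nil => intro d _; rfl
  | cons ms t ih =>
    intro d h
    rw [List.foldl_cons, ih _ (fun ms' hms' q hq => ?_), pv_modlist_keys _ _ (h ms (by simp))]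
    rw [pv_modlist_keys _ _ (h ms (by simp))]
    exact h ms' (by simp [hms']) q hq

theorem pv_modfold_getD (vals : List (List String)) :
    ∀ (d : PySem.Dict (String × String) Int) (p : String × String),
      (vals.foldl (fun ov ms =>
        (pvPairsB (PySem.List.sorted ms (fun x => x))).foldl
          (fun ov p => ov.modify p 0 (· + 1)) ov) d).getD p 0
      = d.getD p 0 + ((vals.map (fun ms => ((pvPairsB (PySem.List.sorted ms (fun x => x))).count p : Int))).sum) := by
  induction vals with
  | nil => intro d p; simp
  | cons ms t ih =>
    intro d p
    rw [List.foldl_cons, ih, PySem.Dict.getD_foldl_modify_add_one]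
    simp [add_assoc]

theorem pv_mem_trips_iff (fbm : List (String × List (List (String × List String)))) (n m : String) :
    (n, m) ∈ pvTrips fbm ↔ ∃ mf, mf ∈ fbm ∧ mf.1 = m ∧ n ∈ pvFlat mf := by
  simp only [pvTrips, List.mem_flatMap, List.mem_map, Prod.mk.injEq]
  constructor
  · rintro ⟨mf, hmf, a, ha, h1, h2⟩
    exact ⟨mf, hmf, h2, h1 ▸ ha⟩
  · rintro ⟨mf, hmf, h2, hn⟩
    exact ⟨mf, hmf, n, hn, rfl, h2⟩

theorem pv_mnp_items (fbm : List (String × List (List (String × List String))))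
    (hpre : (fbm.map Prod.fst).Nodup) :
    (pvMnp fbm).items = fbm.map (fun mf => (mf.1, pvNpis mf)) := by
  have h := PySem.Dict.items_foldl_insert_fresh fbm (fun mf => mf.1) pvNpis PySem.Dict.empty
    (fun a _ => PySem.Dict.contains_empty _) (by simpa using hpre)
  simpa [pvMnp] using h

theorem pv_mnp_keys (fbm : List (String × List (List (String × List String))))
    (hpre : (fbm.map Prod.fst).Nodup) :
    (pvMnp fbm).keys = fbm.map Prod.fst := by
  simp [PySem.Dict.keys, pv_mnp_items fbm hpre, List.map_map, Function.comp]

theorem pv_mnp_getD (fbm : List (String × List (List (String × List String))))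
    (hpre : (fbm.map Prod.fst).Nodup) {mf : String × List (List (String × List String))}
    (hmf : mf ∈ fbm) :
    (pvMnp fbm).getD mf.1 PySem.Set.empty = pvNpis mf := by
  have hnd : (pvMnp fbm).keys.Nodup := by rw [pv_mnp_keys fbm hpre]; exact hpre
  exact PySem.Dict.getD_of_mem_items _
    (by rw [pv_mnp_items fbm hpre]
        exact List.mem_map_of_mem hmf) hnd _

theorem pv_idx_values (fbm : List (String × List (List (String × List String)))) :
    (pvIdx fbm).values = (pvIdx fbm).keys.map (fun n => (pvIdx fbm).getD n []) := by
  obtain ⟨i1, i2, i3, i4⟩ := pv_idx_spec (pvTrips fbm) PySem.Dict.empty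
    (by simp [PySem.Dict.keys_empty]) (fun n => by simp [PySem.Dict.getD_empty])
  have hitems : (pvIdx fbm).items = (pvIdx fbm).keys.map (fun k => (k, (pvIdx fbm).getD k [])) :=
    PySem.Dict.items_eq_map_keys _ i1 []
  simp [PySem.Dict.values, hitems, List.map_map, Function.comp]

theorem pv_mem_idx_getD (fbm : List (String × List (List (String × List String))))
    (hpre : (fbm.map Prod.fst).Nodup) {mf : String × List (List (String × List String))}
    (hmf : mf ∈ fbm) (n : String) :
    mf.1 ∈ (pvIdx fbm).getD n [] ↔ n ∈ pvFlat mf := by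
  obtain ⟨i1, i2, i3, i4⟩ := pv_idx_spec (pvTrips fbm) PySem.Dict.empty
    (by simp [PySem.Dict.keys_empty]) (fun n => by simp [PySem.Dict.getD_empty])
  have h3 : mf.1 ∈ (pvIdx fbm).getD n [] ↔
      mf.1 ∈ (PySem.Dict.empty : PySem.Dict String (List String)).getD n [] ∨ (n, mf.1) ∈ pvTrips fbm := i3 n mf.1
  rw [h3]
  simp only [PySem.Dict.getD_empty, List.not_mem_nil, false_or]
  rw [pv_mem_trips_iff]
  constructor
  · rintro ⟨mf', hmf', hfst, hflat⟩
    have heq : mf' = mf := List.inj_on_of_nodup_map hpre hmf' hmf (by simpa using hfst)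
    rwa [heq] at hflat
  · intro hf
    exact ⟨mf, hmf, rfl, hf⟩

-- the per-pair value equality: A's intersection size = B's per-provider count
theorem pv_cAB (fbm : List (String × List (List (String × List String))))
    (hpre : (fbm.map Prod.fst).Nodup)
    {mf1 mf2 : String × List (List (String × List String))}
    (hm1 : mf1 ∈ fbm) (hm2 : mf2 ∈ fbm) (hlt : mf1.1 < mf2.1) :
    PySem.Set.len (PySem.Set.inter (pvNpis mf1) (pvNpis mf2))
    = (((pvIdx fbm).values.map (fun ms => ((pvPairsB (PySem.List.sorted ms (fun x => x))).count (mf1.1, mf2.1) : Int))).sum) := by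
  obtain ⟨i1, i2, i3, i4⟩ := pv_idx_spec (pvTrips fbm) PySem.Dict.empty
    (by simp [PySem.Dict.keys_empty]) (fun n => by simp [PySem.Dict.getD_empty])
  have i1' : (pvIdx fbm).keys.Nodup := i1
  have i4' : ∀ n, ((pvIdx fbm).getD n []).Nodup := i4
  rw [pv_idx_values fbm, List.map_map]
  have hcong : ∀ n ∈ (pvIdx fbm).keys,
      ((fun ms => ((pvPairsB (PySem.List.sorted ms (fun x => x))).count (mf1.1, mf2.1) : Int)) ∘ (fun n => (pvIdx fbm).getD n [])) n
      = (fun n => if decide (n ∈ pvFlat mf1 ∧ n ∈ pvFlat mf2) = true then (1 : Int) else 0) n := by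
    intro n hn
    simp only [Function.comp_apply]
    rw [pv_count_pvPairsB_sorted hlt _ (i4' n)]
    have e1 := pv_mem_idx_getD fbm hpre hm1 n
    have e2 := pv_mem_idx_getD fbm hpre hm2 n
    by_cases hc : n ∈ pvFlat mf1 ∧ n ∈ pvFlat mf2
    · rw [if_pos ⟨e1.2 hc.1, e2.2 hc.2⟩]
      simp [hc]
    · rw [if_neg (fun hm => hc ⟨e1.1 hm.1, e2.1 hm.2⟩)]
      simp [hc]
  rw [List.map_congr_left hcong]
  rw [PySem.List.sum_map_ite_one_zero (fun n => decide (n ∈ pvFlat mf1 ∧ n ∈ pvFlat mf2)) ((pvIdx fbm).keys)]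
  show ((List.filter (fun x => PySem.Set.contains (pvNpis mf2) x) (pvNpis mf1)).length : Int) = _
  have hnat : (List.filter (fun x => PySem.Set.contains (pvNpis mf2) x) (pvNpis mf1)).length
      = List.countP (fun n => decide (n ∈ pvFlat mf1 ∧ n ∈ pvFlat mf2)) (pvIdx fbm).keys := by
    rw [List.countP_eq_length_filter]
    refine List.Perm.length_eq ?_
    refine (List.perm_ext_iff_of_nodup ((pv_nodup_npis mf1).filter _) (i1'.filter _)).2 ?_
    intro x
    simp only [List.mem_filter, PySem.Set.contains_iff, decide_eq_true_eq]
    rw [pv_mem_npis, pv_mem_npis]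
    constructor
    · rintro ⟨h1, h2⟩
      refine ⟨?_, h1, h2⟩
      have hx : x ∈ (pvTrips fbm).map Prod.fst := by
        refine List.mem_map.2 ⟨(x, mf1.1), ?_, rfl⟩
        exact (pv_mem_trips_iff fbm x mf1.1).2 ⟨mf1, hm1, rfl, h1⟩
      exact (i2 x).2 (Or.inr hx)
    · rintro ⟨_, h1, h2⟩
      exact ⟨h1, h2⟩
  rw [hnat]

-- normal forms of the two ports
theorem pv_A_norm (fbm : List (String × List (List (String × List String))))
    (hpre : (fbm.map Prod.fst).Nodup) :
    compute_overlap_matrix fbm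
    = ((pvPairsB (pvMethods fbm)).foldl (fun acc q => acc.insert q (pvCA fbm q)) PySem.Dict.empty).items.map (fun q => (q.1.1, q.1.2, q.2)) := by
  have hE := pv_enum_slice_foldl (σ := PySem.Dict (String × String) Int)
    (fun acc m1 m2 => acc.insert (m1, m2) (pvCA fbm (m1, m2))) [] (pvMethods fbm) PySem.Dict.empty
  simp only [List.nil_append, List.length_nil, Nat.cast_zero] at hE
  have hkeys : (pvMnp fbm).keys = fbm.map Prod.fst := pv_mnp_keys fbm hpre
  show ((PySem.List.enumerate (PySem.List.sorted (pvMnp fbm).keys (fun x => x))).foldl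
      (fun ov p => (PySem.List.slice (PySem.List.sorted (pvMnp fbm).keys (fun x => x)) (some (p.1 + 1)) none).foldl
        (fun ov m2 => ov.insert (p.2, m2) (pvCA fbm (p.2, m2))) ov) PySem.Dict.empty).items.map (fun q => (q.1.1, q.1.2, q.2)) = _
  rw [hkeys]
  exact congrArg (fun d => d.items.map (fun q : (String × String) × Int => (q.1.1, q.1.2, q.2))) hE

theorem pv_B_norm (fbm : List (String × List (List (String × List String)))) :
    compute_overlap_matrix_alt fbm
    = ((pvIdx fbm).values.foldl (fun ov ms =>
        (pvPairsB (PySem.List.sorted ms (fun x => x))).foldl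
          (fun ov p => ov.modify p 0 (· + 1)) ov) (pvDB0 fbm)).items.map (fun q => (q.1.1, q.1.2, q.2)) := by
  have h := pv_index_eq_trips fbm
  show ((fbm.foldl (fun d mf =>
      mf.2.foldl (fun d f =>
        (PySem.Dict.getD (PySem.Dict.mk f) "flagged_providers" []).foldl (fun d npi =>
          let ms := d.getD npi []
          if mf.1 ∈ ms then d else d.insert npi (ms ++ [mf.1])) d) d) PySem.Dict.empty).values.foldl
      (fun ov ms => (pvPairsB (PySem.List.sorted ms (fun x => x))).foldl
        (fun ov p => ov.modify p 0 (· + 1)) ov) (pvDB0 fbm)).items.map (fun q => (q.1.1, q.1.2, q.2)) = _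
  rw [h]
  rfl

-- main equality
theorem pv_main (fbm : List (String × List (List (String × List String))))
    (hpre : (fbm.map Prod.fst).Nodup) :
    compute_overlap_matrix fbm = compute_overlap_matrix_alt fbm := by
  rw [pv_A_norm fbm hpre, pv_B_norm fbm]
  have hplt : (pvMethods fbm).Pairwise (· < ·) := pv_sorted_lt hpre
  have hpnd : (pvPairsB (pvMethods fbm)).Nodup := pv_pvPairsB_nodup hplt
  obtain ⟨i1, i2, i3, i4⟩ := pv_idx_spec (pvTrips fbm) PySem.Dict.empty
    (by simp [PySem.Dict.keys_empty]) (fun n => by simp [PySem.Dict.getD_empty])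
  have hDA : ((pvPairsB (pvMethods fbm)).foldl (fun acc q => acc.insert q (pvCA fbm q)) PySem.Dict.empty).items
      = (pvPairsB (pvMethods fbm)).map (fun q => (q, pvCA fbm q)) := by
    have h := PySem.Dict.items_foldl_insert_fresh (pvPairsB (pvMethods fbm)) (fun q => q) (pvCA fbm)
      PySem.Dict.empty (fun a _ => PySem.Dict.contains_empty _) (by simpa using hpnd)
    simpa using h
  have hDB0items : (pvDB0 fbm).items = (pvPairsB (pvMethods fbm)).map (fun q => (q, (0 : Int))) := by
    have h := PySem.Dict.items_foldl_insert_fresh (pvPairsB (pvMethods fbm)) (fun q => q) (fun _ => (0 : Int))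
      PySem.Dict.empty (fun a _ => PySem.Dict.contains_empty _) (by simpa using hpnd)
    simpa [pvDB0] using h
  have hDB0keys : (pvDB0 fbm).keys = pvPairsB (pvMethods fbm) := by
    simp [PySem.Dict.keys, hDB0items, List.map_map, Function.comp_def]
  have hsub : ∀ ms ∈ (pvIdx fbm).values, ∀ q ∈ pvPairsB (PySem.List.sorted ms (fun x => x)), q ∈ (pvDB0 fbm).keys := by
    intro ms hms q hq
    rw [pv_idx_values fbm] at hms
    rcases List.mem_map.1 hms with ⟨n, hn, rfl⟩
    obtain ⟨a, b⟩ := q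
    have hmem := (pv_mem_pvPairsB_iff (pv_sorted_lt (i4 n)) a b).1 hq
    rw [PySem.List.mem_sorted, PySem.List.mem_sorted] at hmem
    obtain ⟨ha, hb, hab⟩ := hmem
    have haK : a ∈ fbm.map Prod.fst := by
      have ht : (n, a) ∈ pvTrips fbm := ((i3 n a).1 ha).resolve_left (by simp [PySem.Dict.getD_empty])
      rcases (pv_mem_trips_iff fbm n a).1 ht with ⟨mf, hmf, hfst, _⟩
      exact hfst ▸ List.mem_map_of_mem hmf
    have hbK : b ∈ fbm.map Prod.fst := by
      have ht : (n, b) ∈ pvTrips fbm := ((i3 n b).1 hb).resolve_left (by simp [PySem.Dict.getD_empty])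
      rcases (pv_mem_trips_iff fbm n b).1 ht with ⟨mf, hmf, hfst, _⟩
      exact hfst ▸ List.mem_map_of_mem hmf
    rw [hDB0keys]
    exact (pv_mem_pvPairsB_iff hplt a b).2
      ⟨(PySem.List.mem_sorted _ _ _ _).2 haK, (PySem.List.mem_sorted _ _ _ _).2 hbK, hab⟩
  have hkeysF : ((pvIdx fbm).values.foldl (fun ov ms =>
        (pvPairsB (PySem.List.sorted ms (fun x => x))).foldl
          (fun ov p => ov.modify p 0 (· + 1)) ov) (pvDB0 fbm)).keys = pvPairsB (pvMethods fbm) := by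
    rw [pv_modfold_keys _ _ hsub, hDB0keys]
  have hkndF : ((pvIdx fbm).values.foldl (fun ov ms =>
        (pvPairsB (PySem.List.sorted ms (fun x => x))).foldl
          (fun ov p => ov.modify p 0 (· + 1)) ov) (pvDB0 fbm)).keys.Nodup := by
    rw [hkeysF]; exact hpnd
  have hitemsF : ((pvIdx fbm).values.foldl (fun ov ms =>
        (pvPairsB (PySem.List.sorted ms (fun x => x))).foldl
          (fun ov p => ov.modify p 0 (· + 1)) ov) (pvDB0 fbm)).items
      = (pvPairsB (pvMethods fbm)).map (fun q => (q, ((pvIdx fbm).values.foldl (fun ov ms =>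
        (pvPairsB (PySem.List.sorted ms (fun x => x))).foldl
          (fun ov p => ov.modify p 0 (· + 1)) ov) (pvDB0 fbm)).getD q 0)) := by
    have h := PySem.Dict.items_eq_map_keys _ hkndF (0 : Int)
    rwa [hkeysF] at h
  rw [hDA, hitemsF, List.map_map, List.map_map]
  refine List.map_congr_left ?_
  intro q hq
  obtain ⟨a, b⟩ := q
  simp only [Function.comp_apply]
  have hmem := (pv_mem_pvPairsB_iff hplt a b).1 hq
  simp only [pvMethods, PySem.List.mem_sorted] at hmem
  obtain ⟨ha, hb, hab⟩ := hmem
  rcases List.mem_map.1 ha with ⟨mf1, hm1, rfl⟩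
  rcases List.mem_map.1 hb with ⟨mf2, hm2, rfl⟩
  have hval : pvCA fbm (mf1.1, mf2.1) = ((pvIdx fbm).values.foldl (fun ov ms =>
        (pvPairsB (PySem.List.sorted ms (fun x => x))).foldl
          (fun ov p => ov.modify p 0 (· + 1)) ov) (pvDB0 fbm)).getD (mf1.1, mf2.1) 0 := by
    have hg := pv_modfold_getD ((pvIdx fbm).values) (pvDB0 fbm) (mf1.1, mf2.1)
    have h0 : (pvDB0 fbm).getD (mf1.1, mf2.1) 0 = 0 :=
      pv_getD_insert_zero _ _ _ (by simp [PySem.Dict.getD_empty])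
    have hCA : pvCA fbm (mf1.1, mf2.1) = PySem.Set.len (PySem.Set.inter (pvNpis mf1) (pvNpis mf2)) := by
      show PySem.Set.len (PySem.Set.inter ((pvMnp fbm).getD mf1.1 PySem.Set.empty) ((pvMnp fbm).getD mf2.1 PySem.Set.empty)) = _
      rw [pv_mnp_getD fbm hpre hm1, pv_mnp_getD fbm hpre hm2]
    rw [hg, h0, zero_add, hCA, pv_cAB fbm hpre hm1 hm2 hab]
  rw [hval]

-- ===== VERDICT (by name: the statement is the Claim_ definition above) =====
theorem compute_overlap_matrix_spec : Claim_equal_compute_overlap_matrix := by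
  intro fbm _ hpre
  exact pv_main fbm hpre
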